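-- pv_equiv track=rewrite | github.com/IIKovalenko/algorithms_structures | Contest_3/A/A_grasshopper.py | grasshopper
-- ===== SOURCE A (Python) =====
-- def grasshopper(n, k):
--     arr = [0]*(n+1)
--     arr[0] = 1
--     arr[1] = 1
--     depth = 1
--     if n>1:
--         for i in range(2, min(k+1, len(arr))):
--             arr[i] = 1 + sum(arr[i-depth:i])
--             depth +=1
--     if k<n:
--         for i in range(k+1, n+1):
--             arr[i] = sum(arr[i-depth:])
--     return arr[n-1]
-- ===== SOURCE B (Python) =====
-- def grasshopper(n, k):
--     # O(n) sliding-window DP: dp[i] = number of ways, window = sum of last <=k dp values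
--     dp = [1]
--     window = 1
--     for i in range(1, n):
--         dp.append(window)
--         window += dp[i]
--         if i - k >= 0:
--             window -= dp[i - k]
--     return dp[n - 1]
-- ===== Notes on version B (the rewrite author's own statement) =====
-- stated objective: faster
-- what changed: Replaced the O(k)/O(n) slice re-summation inside each DP step by a single O(n) pass that maintains a running sliding-window sum (add the newest entry, drop the one that left the window).
-- outside the precondition, e.g. on grasshopper(3, 0): A returns 2, B returns 1; on grasshopper(3, -1): A returns 1, B raises IndexError; on grasshopper(5, -2): A returns 1, B raises IndexError
import Mathlib
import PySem

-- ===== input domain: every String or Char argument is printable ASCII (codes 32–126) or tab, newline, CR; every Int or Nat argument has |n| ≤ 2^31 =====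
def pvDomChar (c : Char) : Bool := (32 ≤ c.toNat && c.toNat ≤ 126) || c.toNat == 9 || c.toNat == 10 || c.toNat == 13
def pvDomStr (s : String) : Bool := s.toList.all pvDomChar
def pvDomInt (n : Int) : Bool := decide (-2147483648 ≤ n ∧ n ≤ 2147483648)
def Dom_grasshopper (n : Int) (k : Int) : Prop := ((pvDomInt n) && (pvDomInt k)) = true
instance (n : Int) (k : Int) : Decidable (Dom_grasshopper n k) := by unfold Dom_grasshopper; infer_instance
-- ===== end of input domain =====

-- B replaces A's per-step slice re-summation by a single pass maintaining a running sliding-window sum.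


-- ===== PORT A =====
-- loop body of A's first for-loop: state = (arr, depth); arr[i] = 1 + sum(arr[i-depth:i]); depth += 1
def aStep1 (st : List Int × Int) (i : Int) : List Int × Int :=
  (PySem.List.pySetD st.1 i (1 + (PySem.List.slice st.1 (some (i - st.2)) (some i)).sum), st.2 + 1)

-- loop body of A's second for-loop: arr[i] = sum(arr[i-depth:])
def aStep2 (depth : Int) (arr : List Int) (i : Int) : List Int :=
  PySem.List.pySetD arr i (PySem.List.slice arr (some (i - depth)) none).sum

def grasshopper (n : Int) (k : Int) : Int :=
  let arr : List Int := List.replicate (n + 1).toNat 0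
  let arr := PySem.List.pySetD arr 0 1
  let arr := PySem.List.pySetD arr 1 1
  let st : List Int × Int :=
    if n > 1 then
      (PySem.List.pyRange 2 (min (k + 1) (arr.length : Int)) 1).foldl aStep1 (arr, 1)
    else (arr, 1)
  let arr :=
    if k < n then
      (PySem.List.pyRange (k + 1) (n + 1) 1).foldl (aStep2 st.2) st.1
    else st.1
  PySem.List.pyGetD arr (n - 1) 0

-- ===== PORT B =====
-- loop body of B: state = (dp, window); dp.append(window); window += dp[i]; if i - k >= 0: window -= dp[i-k]
def altStep (k : Int) (st : List Int × Int) (i : Int) : List Int × Int :=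
  let dp := st.1 ++ [st.2]
  let window := st.2 + PySem.List.pyGetD dp i 0
  let window := if 0 ≤ i - k then window - PySem.List.pyGetD dp (i - k) 0 else window
  (dp, window)

def grasshopper_alt (n : Int) (k : Int) : Int :=
  let st := (PySem.List.pyRange 1 n 1).foldl (altStep k) ([1], 1)
  PySem.List.pyGetD st.1 (n - 1) 0

-- ===== PRECONDITION & SPEC =====
-- Pre_ excludes n < 1, where A raises IndexError, and k <= 0, where the jump bound is meaningless
-- and no behaviour is specified: A's value there is an artefact of negative-slice wraparound and
-- the leftover arr[1] = 1, while B's natural sliding-window code raises IndexError for k < 0.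
def Pre_grasshopper (n : Int) (k : Int) : Prop := 1 ≤ n ∧ 1 ≤ k
instance (n : Int) (k : Int) : Decidable (Pre_grasshopper n k) := by unfold Pre_grasshopper; infer_instance
def pvWitness_grasshopper : Int × Int := (6, 3)

def Spec_grasshopper (n : Int) (k : Int) (out : Int) : Prop := out = grasshopper_alt n k
instance (n : Int) (k : Int) (out : Int) : Decidable (Spec_grasshopper n k out) := by unfold Spec_grasshopper; infer_instance

-- ===== CLAIM (what is proved, stated in full; the proofs are below) =====
def Claim_equal_grasshopper : Prop := ∀ (n : Int) (k : Int), Dom_grasshopper n k → Pre_grasshopper n k → Spec_grasshopper n k (grasshopper n k)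

-- ===== LEMMAS AND PROOFS =====

-- the canonical DP sequence: gseq k j lists the first j+1 window-sum values
def gseq (k : Int) : Nat → List Int
  | 0 => [1]
  | j + 1 => gseq k j ++ [((gseq k j).drop (((j : Int) + 1 - k).toNat)).sum]

lemma gseq_length (k : Int) (j : Nat) : (gseq k j).length = j + 1 := by
  induction j with
  | zero => rfl
  | succ j ih => simp [gseq, ih]

lemma gseq_head (k : Int) (j : Nat) : ∃ t, gseq k j = 1 :: t := by
  induction j with
  | zero => exact ⟨[], rfl⟩
  | succ j ih => obtain ⟨t, ht⟩ := ih; exact ⟨_, by rw [gseq, ht, List.cons_append]⟩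

-- the window sum maintained by B after t iterations
def gwin (k : Int) (t : Nat) : Int := ((gseq k t).drop (((t : Int) + 1 - k).toNat)).sum

lemma getD_append_len (xs : List Int) (x d : Int) : (xs ++ [x]).getD xs.length d = x := by simp

-- B's loop invariant: after t iterations the state is (gseq k t, gwin k t)
lemma bloop (k : Int) (hk : 1 ≤ k) (t : Nat) :
    (PySem.List.pyRange 1 (1 + (t : Int)) 1).foldl (altStep k) ([1], 1) = (gseq k t, gwin k t) := by
  induction t with
  | zero =>
    rw [PySem.List.pyRange_one_eq_nil (by simp)]
    have h0 : ((1 : Int) - k).toNat = 0 := by omega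
    simp [gseq, gwin, h0]
  | succ t ih =>
    rw [show ((1:Int) + ((t+1 : Nat):Int)) = (1+(t:Int))+1 by push_cast; ring,
        PySem.List.pyRange_one_succ_right (by omega), List.foldl_append, ih,
        List.foldl_cons, List.foldl_nil]
    have hdp : gseq k t ++ [gwin k t] = gseq k (t+1) := rfl
    have hget : PySem.List.pyGetD (gseq k t ++ [gwin k t]) (1+(t:Int)) 0 = gwin k t := by
      rw [show (1+(t:Int)) = ((t+1:Nat):Int) by push_cast; ring, PySem.List.pyGetD_natCast]
      have := getD_append_len (gseq k t) (gwin k t) 0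
      rwa [gseq_length] at this
    simp only [altStep]
    rw [hget, hdp, Prod.mk.injEq]
    refine ⟨rfl, ?_⟩
    by_cases hc : 0 ≤ (1+(t:Int)) - k
    · rw [if_pos hc]
      -- m := index of the element leaving the window
      set m : Nat := ((t : Int) + 1 - k).toNat with hm
      have hmt : m ≤ t := by omega
      have hlen : (gseq k (t+1)).length = t + 2 := gseq_length k (t+1)
      have hgetm : PySem.List.pyGetD (gseq k (t+1)) ((1+(t:Int)) - k) 0 = (gseq k (t+1)).getD m 0 := by
        rw [show (1+(t:Int)) - k = ((m:Nat):Int) by omega, PySem.List.pyGetD_natCast]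
      have hmlt : m < (gseq k (t+1)).length := by omega
      have hdrop1 : (gseq k (t+1)).drop m = (gseq k (t+1))[m] :: (gseq k (t+1)).drop (m+1) :=
        List.drop_eq_getElem_cons hmlt
      have hdrop2 : (gseq k (t+1)).drop m = (gseq k t).drop m ++ [gwin k t] := by
        rw [← hdp]; exact List.drop_append_of_le_length (by rw [gseq_length]; omega)
      have hgd : (gseq k (t+1)).getD m 0 = (gseq k (t+1))[m] := List.getD_eq_getElem _ _ hmlt
      have hsum1 : ((gseq k (t+1)).drop m).sum = (gseq k (t+1))[m] + ((gseq k (t+1)).drop (m+1)).sum := by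
        rw [hdrop1, List.sum_cons]
      have hsum2 : ((gseq k (t+1)).drop m).sum = gwin k t + gwin k t := by
        rw [hdrop2, List.sum_append]; simp [gwin, hm]
      have hwin : gwin k (t+1) = ((gseq k (t+1)).drop (m+1)).sum := by
        rw [gwin, show (((t+1:Nat):Int) + 1 - k).toNat = m + 1 by omega]
      rw [hgetm, hgd, hwin]
      omega
    · rw [if_neg hc]
      have h0 : ((t : Int) + 1 - k).toNat = 0 := by omega
      have h0' : (((t+1:Nat):Int) + 1 - k).toNat = 0 := by push_cast; omega
      have hw : gwin k (t+1) = (gseq k t).sum + gwin k t := by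
        rw [gwin, h0', List.drop_zero, ← hdp, List.sum_append, List.sum_singleton]
      rw [hw]; simp only [gwin, h0, List.drop_zero]

-- A's array during the loops: the first j+1 DP values followed by the untouched zeros
def padded (k n : Int) (j : Nat) : List Int := gseq k j ++ List.replicate (n.toNat - j) 0

lemma set_append_replicate (xs : List Int) (m : Nat) (v : Int) (hm : 1 ≤ m) :
    (xs ++ List.replicate m (0:Int)).set xs.length v = (xs ++ [v]) ++ List.replicate (m-1) 0 := by
  obtain ⟨m', rfl⟩ : ∃ m', m = m'+1 := ⟨m-1, by omega⟩
  rw [List.set_append_right _ _ (le_refl _)]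
  simp [List.replicate_succ]

-- A's first loop keeps the array in 'padded' shape and depth = iteration count + 1
lemma aloop1 (k n : Int) (t : Nat) (h1 : (t : Int) + 1 ≤ k) (h2 : (t : Int) + 1 ≤ n) :
    (PySem.List.pyRange 2 (2 + (t : Int)) 1).foldl aStep1 (padded k n 1, 1) =
      (padded k n (t + 1), (t : Int) + 1) := by
  induction t with
  | zero =>
    rw [PySem.List.pyRange_one_eq_nil (by simp)]
    simp
  | succ t ih =>
    rw [show ((2:Int) + ((t+1 : Nat):Int)) = (2+(t:Int))+1 by push_cast; ring,
        PySem.List.pyRange_one_succ_right (by omega), List.foldl_append,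
        ih (by push_cast at h1 ⊢; omega) (by push_cast at h2 ⊢; omega),
        List.foldl_cons, List.foldl_nil]
    simp only [aStep1]
    rw [Prod.mk.injEq]
    constructor
    · -- array update
      rw [show (2+(t:Int)) - ((t:Int)+1) = ((1:Nat):Int) by push_cast; ring,
          show (2+(t:Int)) = ((t+2:Nat):Int) by push_cast; ring,
          PySem.List.slice_natCast, PySem.List.pySetD_natCast]
      obtain ⟨tail, htail⟩ := gseq_head k (t+1)
      have hlt : tail.length = t + 1 := by
        have := gseq_length k (t+1); rw [htail] at this; simpa using this
      have hpad : padded k n (t+1) = 1 :: (tail ++ List.replicate (n.toNat - (t+1)) 0) := by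
        rw [padded, htail, List.cons_append]
      have hdrop : (padded k n (t+1)).drop 1 = tail ++ List.replicate (n.toNat - (t+1)) 0 := by
        rw [hpad, List.drop_succ_cons, List.drop_zero]
      have htake : ((padded k n (t+1)).drop 1).take (t + 2 - 1) = tail := by
        rw [hdrop, show t + 2 - 1 = t + 1 from rfl, ← hlt]
        exact List.take_left' rfl
      rw [htake]
      have hv : 1 + tail.sum = (gseq k (t+1)).sum := by rw [htail, List.sum_cons]
      have hentry : gseq k (t+2) = gseq k (t+1) ++ [(gseq k (t+1)).sum] := by
        rw [show t+2 = (t+1)+1 from rfl, gseq,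
            show (((t+1:Nat):Int) + 1 - k).toNat = 0 by push_cast at h1 ⊢; omega,
            List.drop_zero]
      have hsetlen : (t + 2 : Nat) = (gseq k (t+1)).length := by rw [gseq_length]
      rw [hv, padded, hsetlen,
          set_append_replicate _ _ _ (by push_cast at h2; omega), ← hsetlen]
      rw [padded, hentry,
          show n.toNat - (t+1) - 1 = n.toNat - (t+2) by omega, List.append_assoc]
    · push_cast; ring

-- A's second loop continues filling the array with window sums (depth = k)
lemma aloop2 (k n : Int) (hk : 1 ≤ k) (t : Nat) (h2 : (k.toNat : Int) + t ≤ n) :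
    (PySem.List.pyRange (k + 1) (k + 1 + (t : Int)) 1).foldl (aStep2 k) (padded k n k.toNat) =
      padded k n (k.toNat + t) := by
  induction t with
  | zero =>
    rw [PySem.List.pyRange_one_eq_nil (by simp)]
    simp
  | succ t ih =>
    rw [show (k + 1 + ((t+1 : Nat):Int)) = (k+1+(t:Int))+1 by push_cast; ring,
        PySem.List.pyRange_one_succ_right (by omega), List.foldl_append,
        ih (by push_cast at h2 ⊢; omega),
        List.foldl_cons, List.foldl_nil]
    simp only [aStep2]
    have hkn : k = (k.toNat : Int) := by omega
    set j : Nat := k.toNat + t with hj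
    have hjn : (j : Int) + 1 ≤ n := by push_cast at h2 ⊢; omega
    rw [show (k+1+(t:Int)) - k = ((t+1:Nat):Int) by push_cast; ring,
        PySem.List.slice_from_natCast]
    obtain ⟨tail, htail⟩ := gseq_head k j
    have hdropg : (padded k n j).drop (t+1) = (gseq k j).drop (t+1) ++ List.replicate (n.toNat - j) 0 := by
      rw [padded]; exact List.drop_append_of_le_length (by rw [gseq_length]; omega)
    have hsum : ((padded k n j).drop (t+1)).sum = ((gseq k j).drop (t+1)).sum := by
      rw [hdropg, List.sum_append]; simp
    have hentry : gseq k (j+1) = gseq k j ++ [((gseq k j).drop (t+1)).sum] := by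
      rw [gseq, show (((j:Nat):Int) + 1 - k).toNat = t + 1 by push_cast [hj]; omega]
    have hidx : (k+1+(t:Int)) = (((j+1:Nat)):Int) := by push_cast [hj]; omega
    have hsetlen : (j + 1 : Nat) = (gseq k j).length := by rw [gseq_length]
    rw [hsum, hidx, PySem.List.pySetD_natCast, padded, hsetlen,
        set_append_replicate _ _ _ (by omega)]
    rw [show k.toNat + (t+1) = j + 1 from rfl, padded, hentry,
        show n.toNat - j - 1 = n.toNat - (j+1) by omega]

lemma gseq_one (k : Int) (hk : 1 ≤ k) : gseq k 1 = [1, 1] := by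
  simp [gseq, show ((1:Int) - k).toNat = 0 by omega]

lemma initA (k : Int) (M : Nat) (hk : 1 ≤ k) (hM : 1 ≤ M) :
    PySem.List.pySetD (PySem.List.pySetD (List.replicate ((M:Int) + 1).toNat 0) 0 1) 1 1
      = padded k (M:Int) 1 := by
  obtain ⟨M', rfl⟩ : ∃ m, M = m+1 := ⟨M-1, by omega⟩
  rw [show (((M'+1:Nat):Int)+1).toNat = M'+1+1 by omega, List.replicate_succ, List.replicate_succ]
  rw [show (PySem.List.pySetD (0 :: 0 :: List.replicate M' (0:Int)) 0 1) = 1 :: 0 :: List.replicate M' 0 by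
        simp [PySem.List.pySetD_of_nonneg]]
  rw [show (PySem.List.pySetD (1 :: 0 :: List.replicate M' (0:Int)) 1 1) = 1 :: 1 :: List.replicate M' 0 by
        simp [PySem.List.pySetD_of_nonneg]]
  rw [padded, gseq_one k hk, show (((M'+1:Nat)):Int).toNat - 1 = M' by omega]
  rfl

lemma final_get (k : Int) (M : Nat) (hM : 1 ≤ M) :
    (gseq k M).getD (M-1) 0 = (gseq k (M-1)).getD (M-1) 0 := by
  obtain ⟨M', rfl⟩ : ∃ m, M = m+1 := ⟨M-1, by omega⟩
  simp only [Nat.add_sub_cancel]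
  rw [gseq, List.getD_append _ _ _ _ (by rw [gseq_length]; omega)]

lemma tailcalc (k : Int) (M : Nat) (hM : 1 ≤ M) :
    PySem.List.pyGetD (padded k (M:Int) M) ((M:Int) - 1) 0 = (gseq k (M-1)).getD (M-1) 0 := by
  rw [show (padded k (M:Int) M) = gseq k M by rw [padded]; simp,
      show ((M:Int) - 1) = ((M-1:Nat):Int) by omega, PySem.List.pyGetD_natCast,
      final_get k M hM]

lemma main_eq (n k : Int) (hn : 1 ≤ n) (hk : 1 ≤ k) : grasshopper n k = grasshopper_alt n k := by
  obtain ⟨M, rfl⟩ : ∃ M : Nat, n = (M:Int) := ⟨n.toNat, by omega⟩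
  have hM : 1 ≤ M := by exact_mod_cast hn
  have hB : grasshopper_alt (M:Int) k = (gseq k (M-1)).getD (M-1) 0 := by
    simp only [grasshopper_alt]
    rw [show (M:Int) = 1 + ((M-1:Nat):Int) by omega, bloop k hk,
        show (1 + ((M-1:Nat):Int)) - 1 = ((M-1:Nat):Int) by ring,
        show ((gseq k (M-1), gwin k (M-1)) : List Int × Int).1 = gseq k (M-1) from rfl,
        PySem.List.pyGetD_natCast]
  rw [hB]
  simp only [grasshopper]
  rw [initA k M hk hM]
  have hlen : ((padded k (M:Int) 1).length : Int) = (M:Int) + 1 := by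
    rw [padded, List.length_append, gseq_length, List.length_replicate]; push_cast; omega
  rw [hlen]
  by_cases hkM : k < (M:Int)
  · rw [if_pos (show (M:Int) > 1 by omega), if_pos hkM,
        show min (k+1) ((M:Int)+1) = 2 + ((k.toNat-1 : Nat):Int) by omega,
        aloop1 k (M:Int) (k.toNat-1) (by omega) (by omega)]
    rw [show k.toNat - 1 + 1 = k.toNat by omega]
    rw [show ((padded k (M:Int) k.toNat, ((k.toNat-1:Nat):Int)+1) : List Int × Int).2 = ((k.toNat-1:Nat):Int)+1 from rfl,
        show ((padded k (M:Int) k.toNat, ((k.toNat-1:Nat):Int)+1) : List Int × Int).1 = padded k (M:Int) k.toNat from rfl]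
    rw [show ((k.toNat-1:Nat):Int)+1 = k by omega,
        show (M:Int) + 1 = k + 1 + ((M - k.toNat : Nat):Int) by omega,
        aloop2 k (M:Int) hk (M - k.toNat) (by omega),
        show k.toNat + (M - k.toNat) = M by omega]
    exact tailcalc k M hM
  · by_cases hM1 : M = 1
    · rw [if_neg (show ¬ ((M:Int) > 1) by omega), if_neg hkM,
          show (((padded k (M:Int) 1, (1:Int))) : List Int × Int).1 = padded k (M:Int) 1 from rfl,
          show padded k (M:Int) 1 = padded k (M:Int) M by rw [hM1]]
      exact tailcalc k M hM
    · rw [if_pos (show (M:Int) > 1 by omega),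
          show min (k+1) ((M:Int)+1) = 2 + ((M-1 : Nat):Int) by omega]
      have h1 : ((M-1 : Nat) : Int) + 1 ≤ k := by omega
      have h2 : ((M-1 : Nat) : Int) + 1 ≤ (M:Int) := by omega
      rw [aloop1 k (M:Int) (M-1) h1 h2, show M - 1 + 1 = M by omega, if_neg hkM]
      rw [show ((padded k (M:Int) M, ((M-1:Nat):Int)+1) : List Int × Int).1 = padded k (M:Int) M from rfl]
      exact tailcalc k M hM

-- ===== VERDICT (by name: the statement is the Claim_ definition above) =====
theorem grasshopper_spec : Claim_equal_grasshopper := by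
  intro n k _ hpre
  exact main_eq n k hpre.1 hpre.2
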